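-- pv_equiv track=rewrite | github.com/sushkomihail/gitflow | logic.py | move_top
-- ===== SOURCE A (Python) =====
-- import copy
--
-- def move_top(board):
--     old_board = copy.deepcopy(board)
--     score1 = 0
--     board2 = []
--     board3 = []
--     mass2 = []
--     mass = []
--     s = 0
--     n = 0
--     for _ in range(4):
--         for row in board:
--             mass.append(row[s])
--         board2.append(mass)
--         mass = []
--         s += 1
--     for row in board2:
--         while 0 in row:
--             row.remove(0)
--         while len(row) != 4:
--             row.append(0)
--     for i in range(4):
--         for j in range(3):
--             if board2[i][j] == board2[i][j + 1] and board2[i][j + 1] != 0: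
--                 board2[i][j] *= 2
--                 score1 += board2[i][j]
--                 board2[i].pop(j + 1)
--                 board2[i].append(0)
--     for _ in range(4):
--         for row in board2:
--             mass2.append(row[n])
--         board3.append(mass2)
--         mass2 = []
--         n += 1
--     return board3, score1, not old_board == board3
-- ===== SOURCE B (Python) =====
-- def move_top(board):
--     score = 0
--     cols = []
--     for c in range(4):
--         col = [row[c] for row in board if row[c] != 0]
--         merged = []
--         i = 0
--         while i < len(col):
--             if i + 1 < len(col) and col[i] == col[i + 1]:
--                 merged.append(2 * col[i])
--                 score += 2 * col[i]
--                 i += 2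
--             else:
--                 merged.append(col[i])
--                 i += 1
--         cols.append(merged + [0] * (4 - len(merged)))
--     new_board = [[cols[c][r] for c in range(4)] for r in range(4)]
--     return new_board, score, new_board != board
-- ===== Notes on version B (the rewrite author's own statement) =====
-- stated objective: simpler
-- what changed: Replaces A's four mutate-in-place passes (transpose, repeated remove(0), pad-while loop, indexed pop/append merge pass, transpose back) by one pass per column: filter the nonzeros, merge adjacent equal pairs in a single forward scan, pad once, and rebuild the board by a direct double comprehension.
import Mathlib
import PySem

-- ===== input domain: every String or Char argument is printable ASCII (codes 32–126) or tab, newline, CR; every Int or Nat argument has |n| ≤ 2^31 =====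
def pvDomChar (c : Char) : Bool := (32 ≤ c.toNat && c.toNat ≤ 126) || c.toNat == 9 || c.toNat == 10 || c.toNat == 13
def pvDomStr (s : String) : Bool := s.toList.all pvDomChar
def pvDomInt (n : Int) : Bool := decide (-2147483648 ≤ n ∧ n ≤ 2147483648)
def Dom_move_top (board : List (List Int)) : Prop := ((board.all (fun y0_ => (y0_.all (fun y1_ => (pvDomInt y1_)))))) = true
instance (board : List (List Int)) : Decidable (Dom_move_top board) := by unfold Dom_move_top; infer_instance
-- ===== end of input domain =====

-- B replaces A's five mutate-in-place passes by one filter + single merge scan per column; same return value, no speed claim.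
-- Neither implementation mutates its argument (A deep-copies, B only reads), so return-value equivalence is full equivalence.

-- ===== PORT A =====

-- 'while 0 in row: row.remove(0)'  (list.remove removes the first occurrence = List.erase)
def removeZeros (row : List Int) : List Int :=
  if h : (0 : Int) ∈ row then removeZeros (row.erase 0) else row
termination_by row.length
decreasing_by have h1 := List.length_erase (a := (0:Int)) (l := row); rw [if_pos h] at h1; have h2 := List.length_pos_of_mem h; omega

-- 'while len(row) != 4: row.append(0)'  (Python diverges when len > 4; that is outside Pre_, the port returns row there)
def padTo4 (row : List Int) : List Int :=
  if row.length < 4 then padTo4 (row ++ [0]) else row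
termination_by 4 - row.length
decreasing_by simp_all; omega

-- body of 'for j in range(3)': compare row[j] and row[j+1], double, pop(j+1), append 0, add to score
def mergeAt (p : List Int × Int) (j : Int) : List Int × Int :=
  let a := PySem.List.pyGetD p.1 j 0
  let b := PySem.List.pyGetD p.1 (j + 1) 0
  if a = b ∧ b ≠ 0 then
    let row := PySem.List.pySetD p.1 j (a * 2)
    let row := match PySem.List.pop? row (j + 1) with   -- 'pop(j+1)': in range under Pre_
      | some (_, r) => r ++ [0]
      | none => row
    (row, p.2 + a * 2)
  else p

def move_top (board : List (List Int)) : List (List Int) × Int × Bool :=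
  let old_board := board   -- copy.deepcopy(board); A never mutates the input's rows
  -- first transpose loop: 'for _ in range(4): mass = [row[s] for row in board]; s += 1'
  let board2 := (PySem.List.pyRange 0 4 1).map (fun s => board.map (fun row => PySem.List.pyGetD row s 0))
  -- zero removal and padding, in place on each of the 4 column lists
  let board2 := board2.map (fun row => padTo4 (removeZeros row))
  -- 'for i in range(4): for j in range(3): …' — board2 has exactly 4 rows, so iterating the list is range(4)
  let st := board2.foldl (fun (acc : List (List Int) × Int) row =>
      let r := (PySem.List.pyRange 0 3 1).foldl mergeAt (row, acc.2)
      (acc.1 ++ [r.1], r.2)) ([], 0)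
  -- transpose back: 'for _ in range(4): mass2 = [row[n] for row in board2]; n += 1'
  let board3 := (PySem.List.pyRange 0 4 1).map (fun n => st.1.map (fun row => PySem.List.pyGetD row n 0))
  (board3, st.2, !(old_board == board3))

-- ===== PORT B =====

-- the while-loop scan of Source B: merge adjacent equal pairs once, left to right, returning (merged, score delta)
def scanMerge (col : List Int) : List Int × Int :=
  match col with
  | [] => ([], 0)
  | [a] => ([a], 0)
  | a :: b :: rest =>
    if a = b then
      let r := scanMerge rest
      (2 * a :: r.1, 2 * a + r.2)
    else
      let r := scanMerge (b :: rest)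
      (a :: r.1, r.2)

def move_top_alt (board : List (List Int)) : List (List Int) × Int × Bool :=
  -- 'for c in range(4): col = [row[c] for row in board if row[c] != 0]; … cols.append(merged + [0]*(4-len(merged)))'
  let st := (PySem.List.pyRange 0 4 1).foldl (fun (acc : List (List Int) × Int) c =>
      let col := (board.map (fun row => PySem.List.pyGetD row c 0)).filter (fun v => v ≠ 0)
      let m := scanMerge col
      (acc.1 ++ [m.1 ++ List.replicate (4 - m.1.length) 0], acc.2 + m.2)) ([], 0)
  -- 'new_board = [[cols[c][r] for c in range(4)] for r in range(4)]'
  let new_board := (PySem.List.pyRange 0 4 1).map (fun r =>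
      (PySem.List.pyRange 0 4 1).map (fun c => PySem.List.pyGetD (PySem.List.pyGetD st.1 c []) r 0))
  (new_board, st.2, !(new_board == board))

-- ===== PRECONDITION & SPEC =====
-- Pre_ excludes boards with a row shorter than 4 (A raises IndexError on row[s]) and boards with more than
-- 4 rows (A's 'while len(row) != 4: append(0)' padding loop diverges whenever some column keeps more than
-- 4 nonzero cells; the 2048 board is 4×4).
def Pre_move_top (board : List (List Int)) : Prop :=
  board.length ≤ 4 ∧ ∀ row ∈ board, 4 ≤ row.length
instance (board : List (List Int)) : Decidable (Pre_move_top board) := by unfold Pre_move_top; infer_instance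

def pvWitness_move_top : List (List Int) := [[2, 2, 0, 4], [0, 2, 0, 4], [2, 0, 0, 0], [2, 2, 2, 2]]

def Spec_move_top (board : List (List Int)) (out : List (List Int) × Int × Bool) : Prop := out = move_top_alt board
instance (board : List (List Int)) (out : List (List Int) × Int × Bool) : Decidable (Spec_move_top board out) := by unfold Spec_move_top; infer_instance

-- ===== CLAIM (what is proved, stated in full; the proofs are below) =====
def Claim_equal_move_top : Prop := ∀ (board : List (List Int)), Dom_move_top board → Pre_move_top board → Spec_move_top board (move_top board)

-- ===== LEMMAS AND PROOFS =====

lemma erase_zero_filter (l : List Int) : (l.erase 0).filter (fun v => v ≠ 0) = l.filter (fun v => v ≠ 0) := by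
  induction l with
  | nil => rfl
  | cons x xs ih =>
    by_cases hx : x = 0
    · subst hx; simp
    · rw [List.erase_cons_tail (by simpa using hx)]
      simp only [ne_eq, decide_not] at ih
      simp [hx, ih]

lemma removeZeros_eq_filter (l : List Int) : removeZeros l = l.filter (fun v => v ≠ 0) := by
  fun_induction removeZeros l with
  | case1 l h ih => rw [ih, erase_zero_filter]
  | case2 l h =>
    rw [List.filter_eq_self.2]
    intro a ha
    simp only [ne_eq, decide_eq_true_eq]
    rintro rfl; exact h ha

lemma padTo4_eq (l : List Int) (h : l.length ≤ 4) :
    padTo4 l = l ++ List.replicate (4 - l.length) 0 := by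
  fun_induction padTo4 l with
  | case1 l hl ih =>
    rw [ih (by simp; omega)]
    have : 4 - l.length = (4 - (l.length+1)) + 1 := by omega
    simp only [List.append_assoc, List.cons_append, List.nil_append, List.length_append,
      List.length_cons, List.length_nil]
    rw [this, List.replicate_succ]
  | case2 l hl =>
    have : 4 - l.length = 0 := by omega
    simp [this]

lemma col_lemma (ys : List Int) (hlen : ys.length ≤ 4) (hnz : ∀ v ∈ ys, v ≠ 0) (s : Int) :
    (PySem.List.pyRange 0 3 1).foldl mergeAt (padTo4 ys, s)
      = ((scanMerge ys).1 ++ List.replicate (4 - (scanMerge ys).1.length) 0, s + (scanMerge ys).2) := by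
  have hr3 : PySem.List.pyRange 0 3 1 = [0,1,2] := by decide
  rw [hr3, padTo4_eq ys hlen]
  match ys, hlen, hnz with
  | [], _, _ => simp [mergeAt, scanMerge, PySem.List.pyGetD, PySem.List.pyGet?, PySem.List.pyIdx?, PySem.List.pySetD, PySem.List.pySet?, PySem.List.pop?, List.replicate]
  | [a], _, hnz =>
    have ha : a ≠ 0 := hnz a (by simp)
    simp [mergeAt, scanMerge, PySem.List.pyGetD, PySem.List.pyGet?, PySem.List.pyIdx?, PySem.List.pySetD, PySem.List.pySet?, PySem.List.pop?, List.replicate, ha]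
  | [a,b], _, hnz =>
    have ha : a ≠ 0 := hnz a (by simp)
    have hb : b ≠ 0 := hnz b (by simp)
    by_cases hab : a = b
    · subst hab
      simp [mergeAt, scanMerge, PySem.List.pyGetD, PySem.List.pyGet?, PySem.List.pyIdx?, PySem.List.pySetD, PySem.List.pySet?, PySem.List.pop?, List.replicate, ha, mul_comm]
    · simp [mergeAt, scanMerge, PySem.List.pyGetD, PySem.List.pyGet?, PySem.List.pyIdx?, PySem.List.pySetD, PySem.List.pySet?, PySem.List.pop?, List.replicate, ha, hb, hab]
  | [a,b,c], _, hnz =>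
    have ha : a ≠ 0 := hnz a (by simp)
    have hb : b ≠ 0 := hnz b (by simp)
    have hc : c ≠ 0 := hnz c (by simp)
    by_cases hab : a = b
    · subst hab
      simp [mergeAt, scanMerge, PySem.List.pyGetD, PySem.List.pyGet?, PySem.List.pyIdx?, PySem.List.pySetD, PySem.List.pySet?, PySem.List.pop?, List.replicate, ha, hc, mul_comm, add_assoc]
    · by_cases hbc : b = c
      · subst hbc
        simp [mergeAt, scanMerge, PySem.List.pyGetD, PySem.List.pyGet?, PySem.List.pyIdx?, PySem.List.pySetD, PySem.List.pySet?, PySem.List.pop?, List.replicate, ha, hb, hab, mul_comm]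
      · simp [mergeAt, scanMerge, PySem.List.pyGetD, PySem.List.pyGet?, PySem.List.pyIdx?, PySem.List.pySetD, PySem.List.pySet?, PySem.List.pop?, List.replicate, ha, hb, hc, hab, hbc]
  | [a,b,c,d], _, hnz =>
    have ha : a ≠ 0 := hnz a (by simp)
    have hb : b ≠ 0 := hnz b (by simp)
    have hc : c ≠ 0 := hnz c (by simp)
    have hd : d ≠ 0 := hnz d (by simp)
    by_cases hab : a = b
    · subst hab
      by_cases hcd : c = d
      · subst hcd
        simp [mergeAt, scanMerge, PySem.List.pyGetD, PySem.List.pyGet?, PySem.List.pyIdx?, PySem.List.pySetD, PySem.List.pySet?, PySem.List.pop?, List.replicate, ha, hc, mul_comm, add_assoc]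
      · simp [mergeAt, scanMerge, PySem.List.pyGetD, PySem.List.pyGet?, PySem.List.pyIdx?, PySem.List.pySetD, PySem.List.pySet?, PySem.List.pop?, List.replicate, ha, hc, hd, hcd, mul_comm]
    · by_cases hbc : b = c
      · subst hbc
        simp [mergeAt, scanMerge, PySem.List.pyGetD, PySem.List.pyGet?, PySem.List.pyIdx?, PySem.List.pySetD, PySem.List.pySet?, PySem.List.pop?, List.replicate, ha, hb, hd, hab, mul_comm]
      · by_cases hcd : c = d
        · subst hcd
          simp [mergeAt, scanMerge, PySem.List.pyGetD, PySem.List.pyGet?, PySem.List.pyIdx?, PySem.List.pySetD, PySem.List.pySet?, PySem.List.pop?, List.replicate, ha, hb, hc, hab, hbc, mul_comm]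
        · simp [mergeAt, scanMerge, PySem.List.pyGetD, PySem.List.pyGet?, PySem.List.pyIdx?, PySem.List.pySetD, PySem.List.pySet?, PySem.List.pop?, List.replicate, ha, hb, hc, hd, hab, hbc, hcd]
  | a::b::c::d::e::rest, hlen, _ => simp at hlen; omega

lemma getD4_0 (y0 y1 y2 y3 : List Int) : PySem.List.pyGetD [y0,y1,y2,y3] (0:Int) ([] : List Int) = y0 := rfl
lemma getD4_1 (y0 y1 y2 y3 : List Int) : PySem.List.pyGetD [y0,y1,y2,y3] (1:Int) ([] : List Int) = y1 := rfl
lemma getD4_2 (y0 y1 y2 y3 : List Int) : PySem.List.pyGetD [y0,y1,y2,y3] (2:Int) ([] : List Int) = y2 := rfl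
lemma getD4_3 (y0 y1 y2 y3 : List Int) : PySem.List.pyGetD [y0,y1,y2,y3] (3:Int) ([] : List Int) = y3 := rfl

lemma beq_flip (x y : List (List Int)) : (x == y) = (y == x) := by
  by_cases h : x = y
  · subst h; rfl
  · rw [beq_eq_false_iff_ne.2 h, beq_eq_false_iff_ne.2 (Ne.symm h)]

-- ===== VERDICT (by name: the statement is the Claim_ definition above) =====
theorem move_top_spec : Claim_equal_move_top := by
  intro board _ hpre
  obtain ⟨hb4, hrows⟩ := hpre
  unfold Spec_move_top move_top move_top_alt
  have hr4 : PySem.List.pyRange 0 4 1 = [(0:Int),1,2,3] := by decide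
  have hcol : ∀ c s : Int,
      (PySem.List.pyRange 0 3 1).foldl mergeAt
        (padTo4 ((board.map (fun row => PySem.List.pyGetD row c 0)).filter (fun v => v ≠ 0)), s)
        = ((scanMerge ((board.map (fun row => PySem.List.pyGetD row c 0)).filter (fun v => v ≠ 0))).1
             ++ List.replicate (4 - (scanMerge ((board.map (fun row => PySem.List.pyGetD row c 0)).filter (fun v => v ≠ 0))).1.length) 0,
           s + (scanMerge ((board.map (fun row => PySem.List.pyGetD row c 0)).filter (fun v => v ≠ 0))).2) := by
    intro c s
    apply col_lemma
    · have h1 := List.length_filter_le (fun v => decide (v ≠ 0)) (board.map (fun row => PySem.List.pyGetD row c 0))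
      simp at h1 ⊢
      omega
    · intro v hv
      have := (List.mem_filter.1 hv).2
      simpa using this
  simp only [hr4, List.map_cons, List.map_nil, List.foldl_cons, List.foldl_nil,
    removeZeros_eq_filter, hcol]
  simp only [List.nil_append, List.cons_append, List.map_cons, List.map_nil,
    getD4_0, getD4_1, getD4_2, getD4_3]
  exact Prod.ext rfl (Prod.ext rfl (by rw [beq_flip]))
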